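-- pv_equiv track=rewrite | github.com/bondreamey2006/synthetix | app/services/chunking.py | _build_sentence_chunks
-- ===== SOURCE A (Python) =====
-- def _build_sentence_chunks(sentences: list[str], chunk_size: int, overlap_sentences: int) -> list[list[str]]:
--     chunks: list[list[str]] = []
--     i = 0
--     while i < len(sentences):
--         current: list[str] = []
--         current_len = 0
--         j = i
--         while j < len(sentences):
--             sentence = sentences[j]
--             projected = current_len + len(sentence) + (1 if current else 0)
--             if projected > chunk_size and current:
--                 break
--             current.append(sentence)
--             current_len = projected
--             j += 1
--         if current:
--             chunks.append(current)
--         if j >= len(sentences):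
--             break
--         i = max(i + 1, j - overlap_sentences)
--     return chunks
-- ===== SOURCE B (Python) =====
-- def _build_sentence_chunks(sentences: list[str], chunk_size: int, overlap_sentences: int) -> list[list[str]]:
--     # Prefix sums + binary search: P[k] = sum(len(s)+1 for first k sentences),
--     # so a chunk sentences[i:e] has joined length P[e] - P[i] - 1.
--     n = len(sentences)
--     P = [0] * (n + 1)
--     for k, s in enumerate(sentences):
--         P[k + 1] = P[k] + len(s) + 1
--     chunks: list[list[str]] = []
--     i = 0
--     while i < n:
--         x = chunk_size + P[i] + 1
--         lo, hi = i + 1, n + 1          # find first index in [i+1, n+1) with P > x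
--         while lo < hi:
--             mid = (lo + hi) // 2
--             if P[mid] <= x:
--                 lo = mid + 1
--             else:
--                 hi = mid
--         e = lo - 1 if lo - 1 > i else i + 1   # always take at least one sentence
--         chunks.append(sentences[i:e])
--         if e >= n:
--             break
--         i = max(i + 1, e - overlap_sentences)
--     return chunks
-- ===== Notes on version B (the rewrite author's own statement) =====
-- stated objective: alternative
-- what changed: B precomputes one prefix-sum array of joined lengths and finds each chunk's end index by binary search over it, instead of A's inner loop that re-scans and re-measures every sentence of each (overlapping) window.
import Mathlib
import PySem

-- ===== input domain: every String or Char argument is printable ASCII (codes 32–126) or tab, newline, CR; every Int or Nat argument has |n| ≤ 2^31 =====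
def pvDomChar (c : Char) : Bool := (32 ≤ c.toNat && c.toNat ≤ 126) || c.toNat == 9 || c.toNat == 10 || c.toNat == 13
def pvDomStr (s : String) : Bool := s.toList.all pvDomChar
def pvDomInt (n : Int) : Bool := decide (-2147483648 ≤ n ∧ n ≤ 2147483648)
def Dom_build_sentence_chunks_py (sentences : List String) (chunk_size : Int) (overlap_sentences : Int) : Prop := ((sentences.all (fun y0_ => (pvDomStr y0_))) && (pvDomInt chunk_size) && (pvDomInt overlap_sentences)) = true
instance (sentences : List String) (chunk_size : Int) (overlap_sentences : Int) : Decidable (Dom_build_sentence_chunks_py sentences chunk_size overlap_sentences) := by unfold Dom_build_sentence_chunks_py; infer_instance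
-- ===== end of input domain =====

-- B replaces A's inner re-scanning loop by one prefix-sum pass plus a binary search per chunk (objective: alternative algorithm).

-- ===== PORT A =====
-- inner `while j < len(sentences)` loop of A, state (current, current_len, j)
def pvInnerA (sentences : List String) (chunk_size : Int) :
    Nat → List String → Int → Nat → List String × Nat
  | 0, current, _, j => (current, j)
  | fuel + 1, current, current_len, j =>
    if h : j < sentences.length then
      let sentence := sentences[j]'h
      let projected := current_len + PySem.Str.len sentence + (if current = [] then 0 else 1)
      if projected > chunk_size ∧ current ≠ [] then (current, j)
      else pvInnerA sentences chunk_size fuel (current ++ [sentence]) projected (j + 1)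
    else (current, j)

-- outer `while i < len(sentences)` loop of A, state (chunks, i)
def pvOuterA (sentences : List String) (chunk_size overlap_sentences : Int) :
    Nat → List (List String) → Nat → List (List String)
  | 0, chunks, _ => chunks
  | fuel + 1, chunks, i =>
    if i < sentences.length then
      let r := pvInnerA sentences chunk_size (sentences.length - i) [] 0 i
      let chunks' := if r.1 = [] then chunks else chunks ++ [r.1]
      if sentences.length ≤ r.2 then chunks'
      else pvOuterA sentences chunk_size overlap_sentences fuel chunks'
        (max ((i : Int) + 1) ((r.2 : Int) - overlap_sentences)).toNat
    else chunks

def build_sentence_chunks_py (sentences : List String) (chunk_size : Int) (overlap_sentences : Int) : List (List String) :=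
  pvOuterA sentences chunk_size overlap_sentences sentences.length [] 0

-- ===== PORT B =====
-- prefix-sum loop of B: pvPrefix ss = [P[0], …, P[n]], P[k] = sum(len(s)+1 for s in ss[:k])
def pvPrefixAux (ss : List String) (acc : Int) : List Int :=
  match ss with
  | [] => []
  | s :: t => (acc + PySem.Str.len s + 1) :: pvPrefixAux t (acc + PySem.Str.len s + 1)

def pvPrefix (ss : List String) : List Int := 0 :: pvPrefixAux ss 0

-- B's binary search: first index in [lo, hi) whose P-value exceeds x (hi if none)
def pvBisect (P : List Int) (x : Int) : Nat → Nat → Nat → Nat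
  | 0, lo, _ => lo
  | fuel + 1, lo, hi =>
    if lo < hi then
      let mid := (lo + hi) / 2
      if P.getD mid 0 ≤ x then pvBisect P x fuel (mid + 1) hi else pvBisect P x fuel lo mid
    else lo

-- outer `while i < n` loop of B
def pvOuterB (sentences : List String) (P : List Int) (chunk_size overlap_sentences : Int) :
    Nat → List (List String) → Nat → List (List String)
  | 0, chunks, _ => chunks
  | fuel + 1, chunks, i =>
    if i < sentences.length then
      let x := chunk_size + P.getD i 0 + 1
      let lo := pvBisect P x (sentences.length - i) (i + 1) (sentences.length + 1)
      let e := if i < lo - 1 then lo - 1 else i + 1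
      let chunks' := chunks ++ [PySem.List.slice sentences (some (i : Int)) (some (e : Int))]
      if sentences.length ≤ e then chunks'
      else pvOuterB sentences P chunk_size overlap_sentences fuel chunks'
        (max ((i : Int) + 1) ((e : Int) - overlap_sentences)).toNat
    else chunks

def build_sentence_chunks_py_alt (sentences : List String) (chunk_size : Int) (overlap_sentences : Int) : List (List String) :=
  pvOuterB sentences (pvPrefix sentences) chunk_size overlap_sentences sentences.length [] 0

-- ===== PRECONDITION & SPEC =====
def Spec_build_sentence_chunks_py (sentences : List String) (chunk_size : Int) (overlap_sentences : Int) (out : List (List String)) : Prop := out = build_sentence_chunks_py_alt sentences chunk_size overlap_sentences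
instance (sentences : List String) (chunk_size : Int) (overlap_sentences : Int) (out : List (List String)) : Decidable (Spec_build_sentence_chunks_py sentences chunk_size overlap_sentences out) := by unfold Spec_build_sentence_chunks_py; infer_instance

-- ===== CLAIM (what is proved, stated in full; the proofs are below) =====
def Claim_equal_build_sentence_chunks_py : Prop := ∀ (sentences : List String) (chunk_size : Int) (overlap_sentences : Int), Dom_build_sentence_chunks_py sentences chunk_size overlap_sentences → Spec_build_sentence_chunks_py sentences chunk_size overlap_sentences (build_sentence_chunks_py sentences chunk_size overlap_sentences)

-- ===== LEMMAS AND PROOFS =====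

-- mathematical prefix sum: Pf ss k = sum of (len+1) over the first k sentences
def Pf (ss : List String) (k : Nat) : Int :=
  ((ss.take k).map (fun s => PySem.Str.len s)).sum + k

-- spec walk: A's inner loop boiled down to its end index
def pvWalk (ss : List String) (x : Int) (j : Nat) : Nat :=
  if _h : j < ss.length then
    (if Pf ss (j + 1) ≤ x then pvWalk ss x (j + 1) else j)
  else j
termination_by ss.length - j

theorem pvStrLen_nonneg (s : String) : 0 ≤ PySem.Str.len s := by
  simp [PySem.Str.len_eq]

theorem Pf_succ (ss : List String) (k : Nat) (h : k < ss.length) :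
    Pf ss (k + 1) = Pf ss k + PySem.Str.len ss[k] + 1 := by
  unfold Pf
  rw [List.map_take, List.map_take, List.sum_take_succ _ k (by simpa using h)]
  simp [PySem.Str.len_eq]
  omega

theorem Pf_cons (s : String) (t : List String) (k : Nat) :
    Pf (s :: t) (k + 1) = PySem.Str.len s + 1 + Pf t k := by
  unfold Pf
  simp
  ring

theorem Pf_mono (ss : List String) {j k : Nat} (hjk : j < k) (hk : k ≤ ss.length) :
    Pf ss j < Pf ss k := by
  induction k with
  | zero => omega
  | succ m ih =>
    have hm : m < ss.length := by omega
    have hstep : Pf ss m < Pf ss (m + 1) := by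
      rw [Pf_succ ss m hm]
      have := pvStrLen_nonneg ss[m]
      omega
    rcases Nat.lt_succ_iff_lt_or_eq.mp hjk with h | h
    · exact lt_trans (ih h (by omega)) hstep
    · subst h; exact hstep

theorem pvPrefixAux_getD (ss : List String) :
    ∀ acc k, k < ss.length → (pvPrefixAux ss acc).getD k 0 = acc + Pf ss (k + 1) := by
  induction ss with
  | nil => intro acc k h; simp at h
  | cons s t ih =>
    intro acc k h
    cases k with
    | zero =>
      simp [pvPrefixAux, Pf_cons]
      unfold Pf; simp; ring
    | succ m =>
      simp only [pvPrefixAux, List.getD_cons_succ]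
      rw [ih _ m (by simpa using Nat.lt_of_succ_lt_succ h), Pf_cons]
      ring

theorem pvPrefix_getD (ss : List String) (k : Nat) (hk : k ≤ ss.length) :
    (pvPrefix ss).getD k 0 = Pf ss k := by
  cases k with
  | zero => unfold pvPrefix Pf; simp
  | succ m =>
    unfold pvPrefix
    rw [List.getD_cons_succ, pvPrefixAux_getD ss 0 m (by omega)]
    ring

theorem pvBisect_eq (P : List Int) (x : Int) (t : Nat) :
    ∀ fuel lo hi, hi - lo ≤ fuel → lo ≤ t → t ≤ hi →
    (∀ k, lo ≤ k → k < t → P.getD k 0 ≤ x) →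
    (∀ k, t ≤ k → k < hi → x < P.getD k 0) →
    pvBisect P x fuel lo hi = t := by
  intro fuel
  induction fuel with
  | zero =>
    intro lo hi hf h1 h2 hlow hhigh
    simp only [pvBisect]
    omega
  | succ m ih =>
    intro lo hi hf h1 h2 hlow hhigh
    simp only [pvBisect]
    by_cases hlt : lo < hi
    · rw [if_pos hlt]
      by_cases hle : P.getD ((lo + hi) / 2) 0 ≤ x
      · rw [if_pos hle]
        have hmid : (lo + hi) / 2 < t := by
          by_contra hc
          have := hhigh ((lo + hi) / 2) (by omega) (by omega)
          omega
        exact ih _ _ (by omega) (by omega) h2 (fun k a b => hlow k (by omega) b) hhigh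
      · rw [if_neg hle]
        have hmid : t ≤ (lo + hi) / 2 := by
          by_contra hc
          have := hlow ((lo + hi) / 2) (by omega) (by omega)
          omega
        exact ih _ _ (by omega) h1 (by omega) hlow (fun k a b => hhigh k a (by omega))
    · rw [if_neg hlt]
      omega

theorem pvWalk_ge (ss : List String) (x : Int) (j : Nat) : j ≤ pvWalk ss x j := by
  fun_induction pvWalk ss x j with
  | case1 j h hle ih => omega
  | case2 j h hgt => omega
  | case3 j h => omega

theorem pvWalk_le (ss : List String) (x : Int) (j : Nat) (h : j ≤ ss.length) :
    pvWalk ss x j ≤ ss.length := by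
  fun_induction pvWalk ss x j with
  | case1 j hj hle ih => exact ih (by omega)
  | case2 j hj hgt => omega
  | case3 j hj => omega

theorem pvWalk_val (ss : List String) (x : Int) (j : Nat) :
    pvWalk ss x j = j ∨ Pf ss (pvWalk ss x j) ≤ x := by
  fun_induction pvWalk ss x j with
  | case1 j hj hle ih =>
    rcases ih with h | h
    · right; rw [h]; exact hle
    · right; exact h
  | case2 j hj hgt => left; rfl
  | case3 j hj => left; rfl

theorem pvWalk_stop (ss : List String) (x : Int) (j : Nat)
    (h : pvWalk ss x j < ss.length) : x < Pf ss (pvWalk ss x j + 1) := by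
  fun_induction pvWalk ss x j with
  | case1 j hj hle ih => exact ih h
  | case2 j hj hgt => omega
  | case3 j hj => omega

theorem take_drop_ne_nil (ss : List String) (i j : Nat) (hij : i < j) (hi : i < ss.length) :
    (ss.drop i).take (j - i) ≠ [] := by
  have : ((ss.drop i).take (j - i)).length = min (j - i) (ss.length - i) := by simp
  intro hcon
  rw [hcon] at this
  simp at this
  omega

theorem take_drop_snoc (ss : List String) (i j : Nat) (hij : i ≤ j) (hj : j < ss.length) :
    (ss.drop i).take (j - i) ++ [ss[j]] = (ss.drop i).take (j + 1 - i) := by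
  rw [show j + 1 - i = (j - i) + 1 from by omega, List.take_add_one]
  have h1 : (ss.drop i)[j - i]? = some ss[j] := by
    rw [List.getElem?_drop, show i + (j - i) = j from by omega, List.getElem?_eq_getElem hj]
  rw [h1]
  rfl

theorem pvInnerA_invariant (ss : List String) (cs : Int) (i : Nat) (hi : i < ss.length) :
    ∀ fuel j, ss.length - j ≤ fuel → i < j → j ≤ ss.length →
      pvInnerA ss cs fuel ((ss.drop i).take (j - i)) (Pf ss j - Pf ss i - 1) j =
        ((ss.drop i).take (pvWalk ss (cs + Pf ss i + 1) j - i),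
          pvWalk ss (cs + Pf ss i + 1) j) := by
  intro fuel
  induction fuel with
  | zero =>
    intro j hm hij hj
    have hje : j = ss.length := by omega
    rw [pvInnerA, pvWalk]
    simp [hje]
  | succ m ih =>
    intro j hm hij hj
    rw [pvInnerA, pvWalk]
    by_cases h : j < ss.length
    · simp only [h, dif_pos]
      have hne : (ss.drop i).take (j - i) ≠ [] := take_drop_ne_nil ss i j hij hi
      have hproj : Pf ss j - Pf ss i - 1 + PySem.Str.len ss[j] + (if (ss.drop i).take (j - i) = [] then 0 else 1)
          = Pf ss (j + 1) - Pf ss i - 1 := by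
        rw [if_neg hne, Pf_succ ss j h]
        ring
      by_cases hbr : Pf ss (j + 1) ≤ cs + Pf ss i + 1
      · -- keep appending: recurse
        rw [if_neg (by
          rw [hproj]
          intro hcon
          omega), if_pos hbr]
        rw [hproj, take_drop_snoc ss i j (by omega) h]
        exact ih (j + 1) (by omega) (by omega) (by omega)
      · -- break
        rw [if_pos (by rw [hproj]; exact ⟨by omega, hne⟩), if_neg hbr]
    · simp [h]

theorem pvInnerA_eq (ss : List String) (cs : Int) (i : Nat) (hi : i < ss.length) :
    pvInnerA ss cs (ss.length - i) [] 0 i =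
      ((ss.drop i).take (pvWalk ss (cs + Pf ss i + 1) (i + 1) - i),
        pvWalk ss (cs + Pf ss i + 1) (i + 1)) := by
  obtain ⟨m, hm⟩ : ∃ m, ss.length - i = m + 1 := ⟨ss.length - i - 1, by omega⟩
  rw [hm, pvInnerA]
  simp only [hi, dif_pos, ne_eq, not_true_eq_false, and_false, if_false, ite_true,
    List.nil_append]
  have h1 : (0 : Int) + PySem.Str.len ss[i] + 0 = Pf ss (i + 1) - Pf ss i - 1 := by
    rw [Pf_succ ss i hi]; ring
  rw [h1]
  have h2 : [ss[i]] = (ss.drop i).take (i + 1 - i) := by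
    simp [show i + 1 - i = 1 from by omega, List.take_one]
    rw [List.getElem?_eq_getElem hi]
    rfl
  rw [h2]
  exact pvInnerA_invariant ss cs i hi m (i + 1) (by omega) (by omega) (by omega)

-- B's binary-searched end index equals A's walk end index
theorem pvEnd_eq (ss : List String) (cs : Int) (i : Nat) (hi : i < ss.length) :
    (if i < pvBisect (pvPrefix ss) (cs + Pf ss i + 1) (ss.length - i) (i + 1) (ss.length + 1) - 1
     then pvBisect (pvPrefix ss) (cs + Pf ss i + 1) (ss.length - i) (i + 1) (ss.length + 1) - 1 else i + 1)
    = pvWalk ss (cs + Pf ss i + 1) (i + 1) := by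
  set x := cs + Pf ss i + 1 with hxdef
  set e := pvWalk ss x (i + 1) with hedef
  have he1 : i + 1 ≤ e := pvWalk_ge ss x (i + 1)
  have he2 : e ≤ ss.length := pvWalk_le ss x (i + 1) (by omega)
  by_cases hc : x < Pf ss (i + 1)
  · have hb : pvBisect (pvPrefix ss) x (ss.length - i) (i + 1) (ss.length + 1) = i + 1 := by
      apply pvBisect_eq
      · omega
      · omega
      · omega
      · intro k hk1 hk2; omega
      · intro k hk1 hk2
        rw [pvPrefix_getD ss k (by omega)]
        rcases Nat.eq_or_lt_of_le hk1 with h | h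
        · rw [← h]; exact hc
        · exact lt_trans hc (Pf_mono ss h (by omega))
    have he : e = i + 1 := by
      rcases pvWalk_val ss x (i + 1) with h | h
      · exact h
      · by_contra hcon
        have : Pf ss (i + 1) < Pf ss e := Pf_mono ss (by omega) he2
        rw [← hedef] at h
        omega
    rw [hb, he]
    simp
  · rw [not_lt] at hc
    have hPfe : Pf ss e ≤ x := by
      rcases pvWalk_val ss x (i + 1) with h | h
      · rw [← hedef] at h; rw [h]; exact hc
      · rw [← hedef] at h; exact h
    have hb : pvBisect (pvPrefix ss) x (ss.length - i) (i + 1) (ss.length + 1) = e + 1 := by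
      apply pvBisect_eq
      · omega
      · omega
      · omega
      · intro k hk1 hk2
        rw [pvPrefix_getD ss k (by omega)]
        rcases Nat.eq_or_lt_of_le (show k ≤ e from by omega) with h | h
        · rw [h]; exact hPfe
        · exact le_trans (le_of_lt (Pf_mono ss h he2)) hPfe
      · intro k hk1 hk2
        rw [pvPrefix_getD ss k (by omega)]
        have hel : e < ss.length := by omega
        have := pvWalk_stop ss x (i + 1) (by rw [← hedef]; exact hel)
        rw [← hedef] at this
        rcases Nat.eq_or_lt_of_le hk1 with h | h
        · rw [← h]; exact this
        · exact lt_trans this (Pf_mono ss h (by omega))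
    rw [hb]
    simp
    omega

theorem pvOuter_eq (ss : List String) (cs ov : Int) :
    ∀ fuel i chunks, ss.length - i ≤ fuel →
      pvOuterA ss cs ov fuel chunks i = pvOuterB ss (pvPrefix ss) cs ov fuel chunks i := by
  intro fuel
  induction fuel with
  | zero =>
    intro i chunks hm
    rw [pvOuterA, pvOuterB]
  | succ m ih =>
    intro i chunks hm
    rw [pvOuterA, pvOuterB]
    by_cases h : i < ss.length
    · simp only [h, if_pos]
      rw [pvInnerA_eq ss cs i h, pvPrefix_getD ss i (le_of_lt h), pvEnd_eq ss cs i h]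
      set e := pvWalk ss (cs + Pf ss i + 1) (i + 1) with hedef
      have he1 : i + 1 ≤ e := pvWalk_ge ss (cs + Pf ss i + 1) (i + 1)
      have he2 : e ≤ ss.length := pvWalk_le ss (cs + Pf ss i + 1) (i + 1) (by omega)
      have hslice : PySem.List.slice ss (some (i : Int)) (some (e : Int))
          = (ss.drop i).take (e - i) := PySem.List.slice_natCast ss i e
      have hne : (ss.drop i).take (e - i) ≠ [] := take_drop_ne_nil ss i e (by omega) h
      rw [hslice, if_neg hne]
      by_cases hend : ss.length ≤ e
      · simp [hend]
      · simp only [hend, if_false]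
        exact ih _ _ (by
          have := le_max_left ((i : Int) + 1) ((e : Int) - ov)
          omega)
    · simp [h]

-- ===== VERDICT (by name: the statement is the Claim_ definition above) =====
theorem build_sentence_chunks_py_spec : Claim_equal_build_sentence_chunks_py := by
  intro ss cs ov _
  unfold Spec_build_sentence_chunks_py build_sentence_chunks_py build_sentence_chunks_py_alt
  exact pvOuter_eq ss cs ov ss.length 0 [] (by omega)
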